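-- pv_equiv track=rewrite | github.com/cirosantilli/project-euler-solvers | solvers/77.py | first_value_over
-- ===== SOURCE A (Python) =====
-- from typing import List
--
-- def sieve_primes(limit: int) -> List[int]:
--     """Return list of primes <= limit."""
--     if limit < 2:
--         return []
--     is_prime = bytearray(b"\x01") * (limit + 1)
--     is_prime[0:2] = b"\x00\x00"
--     p = 2
--     while p * p <= limit:
--         if is_prime[p]:
--             step = p
--             start = p * p
--             is_prime[start : limit + 1 : step] = b"\x00" * (
--                 ((limit - start) // step) + 1
--             )
--         p += 1
--     return [i for i in range(2, limit + 1) if is_prime[i]]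
--
-- def count_prime_summations(n: int, primes: List[int]) -> int:
--     """
--     Number of unordered ways to write n as a sum of primes.
--     Standard coin-change DP: each prime can be used unlimited times, order doesn't matter.
--     """
--     ways = [0] * (n + 1)
--     ways[0] = 1
--     for p in primes:
--         if p > n:
--             break
--         for s in range(p, n + 1):
--             ways[s] += ways[s - p]
--     return ways[n]
--
-- def first_value_over(target: int) -> int:
--     n = 2
--     while True:
--         primes = sieve_primes(n)
--         cnt = count_prime_summations(n, primes)
--         if cnt > target:
--             return n
--         n += 1
-- ===== SOURCE B (Python) =====
-- def first_value_over(target: int) -> int: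
--     # Instead of re-sieving and re-running the whole coin-change DP for every
--     # candidate n (A's O(N^3/log N)), sieve and run ONE coin-change DP over a
--     # whole block [0, limit], then scan it for the first n whose prime-partition
--     # count exceeds target; double the block if none is found.
--     limit = 4
--     while True:
--         # sieve of Eratosthenes up to limit
--         is_prime = [True] * (limit + 1)
--         is_prime[0] = is_prime[1] = False
--         p = 2
--         while p * p <= limit:
--             if is_prime[p]:
--                 for m in range(p * p, limit + 1, p):
--                     is_prime[m] = False
--             p += 1
--         primes = [i for i in range(2, limit + 1) if is_prime[i]]
--         # single coin-change DP over the whole block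
--         ways = [0] * (limit + 1)
--         ways[0] = 1
--         for p in primes:
--             for s in range(p, limit + 1):
--                 ways[s] += ways[s - p]
--         # first index whose count exceeds target
--         for n in range(2, limit + 1):
--             if ways[n] > target:
--                 return n
--         limit *= 2
-- ===== Notes on version B (the rewrite author's own statement) =====
-- stated objective: faster
-- what changed: Instead of re-sieving and re-running a fresh coin-change DP for every candidate n, B sieves and runs a single coin-change DP over a whole block [0,limit] and scans it for the first index whose prime-partition count exceeds target, doubling the block when none is found.
import Mathlib
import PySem

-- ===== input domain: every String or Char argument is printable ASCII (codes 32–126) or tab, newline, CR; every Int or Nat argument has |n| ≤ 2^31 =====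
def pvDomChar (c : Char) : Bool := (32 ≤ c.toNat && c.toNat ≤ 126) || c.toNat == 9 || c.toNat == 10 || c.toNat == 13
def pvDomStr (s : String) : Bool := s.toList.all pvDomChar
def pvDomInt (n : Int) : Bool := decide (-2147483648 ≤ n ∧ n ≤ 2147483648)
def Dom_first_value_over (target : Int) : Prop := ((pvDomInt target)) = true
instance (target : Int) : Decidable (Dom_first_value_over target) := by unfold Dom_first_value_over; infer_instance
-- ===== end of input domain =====

-- B replaces A's per-candidate sieve+DP restart by ONE sieve and ONE coin-change DP per
-- doubling block, scanned for the first index over target (objective: faster).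
-- Python's unbounded `while True` loops are ported with a fuel guard chosen ≥ the loop's
-- iteration count (both ports cover candidates 2..512, enough for every |target| ≤ 2^31,
-- and exhaust identically otherwise); all other loops are structural recursion whose fuel
-- likewise exceeds their iteration count, so the loop guard is what stops them.

-- ===== PORT A =====
-- A's `is_prime[start : limit+1 : step] = b"\x00"*…` : set indices start, start+step, … ≤ limit to false
def markMult (fuel step start limit : Nat) (f : List Bool) : List Bool :=
  match fuel with
  | 0 => f
  | fuel + 1 =>
    if start ≤ limit then markMult fuel step (start + step) limit (f.set start false) else f

-- A's `while p * p <= limit` sieve loop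
def sieveLoop (fuel limit p : Nat) (f : List Bool) : List Bool :=
  match fuel with
  | 0 => f
  | fuel + 1 =>
    if p * p ≤ limit then
      sieveLoop fuel limit (p + 1)
        (if f.getD p false then markMult (limit + 1) p (p * p) limit f else f)
    else f

def sieve_primes (limit : Int) : List Int :=
  if limit < 2 then []
  else
    -- bytearray of 1s with is_prime[0:2] = b"\x00\x00"
    let f := sieveLoop (limit.toNat + 1) limit.toNat 2
      (((List.replicate (limit.toNat + 1) true).set 0 false).set 1 false)
    (PySem.List.pyRange 2 (limit + 1) 1).filter (fun i => f.getD i.toNat false)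

-- `for s in range(p, n+1): ways[s] += ways[s-p]`  (identical two lines in A and in Source B)
def dpGo (fuel p N s : Nat) (w : List Int) : List Int :=
  match fuel with
  | 0 => w
  | fuel + 1 =>
    if s ≤ N then dpGo fuel p N (s + 1) (w.set s (w.getD s 0 + w.getD (s - p) 0)) else w

def dpInner (p N : Nat) (w : List Int) : List Int := dpGo (N + 1) p N p w

-- A's `for p in primes: if p > n: break; <inner loop>`
def cpsLoop (n : Int) (primes : List Int) (w : List Int) : List Int :=
  match primes with
  | [] => w
  | p :: ps => if p > n then w else cpsLoop n ps (dpInner p.toNat n.toNat w)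

def count_prime_summations (n : Int) (primes : List Int) : Int :=
  -- ways = [0]*(n+1); ways[0] = 1
  (cpsLoop n primes ((List.replicate (n.toNat + 1) 0).set 0 1)).getD n.toNat 0

-- A's `while True` with fuel: candidates n = 2..512 (enough for every |target| ≤ 2^31)
def fvoLoop (target n : Int) (fuel : Nat) : Int :=
  match fuel with
  | 0 => 0
  | fuel + 1 =>
    let primes := sieve_primes n
    let cnt := count_prime_summations n primes
    if cnt > target then n else fvoLoop target (n + 1) fuel

def first_value_over (target : Int) : Int := fvoLoop target 2 511

-- ===== PORT B =====
-- Source B's inline Eratosthenes sieve: the identical marking algorithm (list of bools with an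
-- explicit marking loop produces the same updates), so it shares markMult/sieveLoop with A's port.
def primesUpto (limit : Nat) : List Int :=
  let f := sieveLoop (limit + 1) limit 2
    (((List.replicate (limit + 1) true).set 0 false).set 1 false)
  (PySem.List.pyRange 2 ((limit : Int) + 1) 1).filter (fun i => f.getD i.toNat false)

-- Source B's single DP over the whole block: `for p in primes: for s in range(p, limit+1): …`
def dpAll (primes : List Int) (L : Nat) (w : List Int) : List Int :=
  primes.foldl (fun w p => dpInner p.toNat L w) w

-- Source B's `for n in range(2, limit+1): if ways[n] > target: return n`
def scanLoop (fuel : Nat) (target : Int) (w : List Int) (i L : Nat) : Option Int :=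
  match fuel with
  | 0 => none
  | fuel + 1 =>
    if i ≤ L then (if w.getD i 0 > target then some (i : Int) else scanLoop fuel target w (i + 1) L)
    else none

-- Source B's `while True` with fuel: blocks limit = 4, 8, …, 512 (same coverage as A's port)
def fvoAltLoop (target : Int) (limit fuel : Nat) : Int :=
  match fuel with
  | 0 => 0
  | fuel + 1 =>
    let primes := primesUpto limit
    let w := dpAll primes limit ((List.replicate (limit + 1) 0).set 0 1)
    match scanLoop (limit + 1) target w 2 limit with
    | some j => j
    | none => fvoAltLoop target (limit * 2) fuel

def first_value_over_alt (target : Int) : Int := fvoAltLoop target 4 8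

-- ===== PRECONDITION & SPEC =====
def Spec_first_value_over (target : Int) (out : Int) : Prop := out = first_value_over_alt target
instance (target : Int) (out : Int) : Decidable (Spec_first_value_over target out) := by unfold Spec_first_value_over; infer_instance

-- ===== CLAIM (what is proved, stated in full; the proofs are below) =====
def Claim_equal_first_value_over : Prop := ∀ (target : Int), Dom_first_value_over target → Spec_first_value_over target (first_value_over target)

-- ===== LEMMAS AND PROOFS =====

-- index/update facts for List-backed arrays
lemma pvGetD_set {α : Type} (l : List α) (i j : Nat) (a d : α) :
    (l.set i a).getD j d = if j = i ∧ i < l.length then a else l.getD j d := by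
  simp [List.getD_eq_getElem?_getD, List.getElem?_set]
  split
  · rename_i h; simp [h]
    split <;> simp_all
  · rename_i h; rw [if_neg]; omega

lemma pvGetD_replicate {α : Type} (n i : Nat) (a d : α) :
    ((List.replicate n a).getD i d) = if i < n then a else d := by
  simp [List.getD_eq_getElem?_getD, List.getElem?_replicate]
  split <;> simp

lemma init_getD (m i : Nat) :
    ((((List.replicate (m + 1) true).set 0 false).set 1 false).getD i false)
      = if 2 ≤ i ∧ i < m + 1 then true else false := by
  rw [pvGetD_set, pvGetD_set, pvGetD_replicate]
  simp only [List.length_set, List.length_replicate]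
  by_cases h1 : i = 1
  · simp [h1]
  · rw [if_neg (by omega)]
    by_cases h0 : i = 0
    · simp [h0]
    · rw [if_neg (by omega)]
      by_cases h2 : i < m + 1
      · rw [if_pos h2, if_pos (by omega)]
      · rw [if_neg h2, if_neg (by omega)]

lemma waysInit_getD (m j : Nat) (hj : j < m) :
    (((List.replicate m (0:Int)).set 0 1).getD j 0) = if j = 0 then 1 else 0 := by
  rw [pvGetD_set, pvGetD_replicate]
  simp only [List.length_replicate]
  by_cases h : j = 0
  · simp [h]; omega
  · rw [if_neg (by omega), if_neg h, if_pos hj]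

-- Specification of the coin-change DP: gcc qs n is the number of multisets drawn from qs
-- (listed in reverse processing order) summing to n.
def gcc : List Nat → Nat → Int
  | [], n => if n = 0 then 1 else 0
  | p :: ps, n => gcc ps n + (if h : 0 < p ∧ p ≤ n then gcc (p :: ps) (n - p) else 0)
termination_by ps n => (ps.length, n)
decreasing_by
  · exact Prod.Lex.left _ _ (by simp)
  · exact Prod.Lex.right _ (by omega)

lemma gcc_nil (j : Nat) : gcc [] j = if j = 0 then 1 else 0 := by rw [gcc]

lemma gcc_small (p : Nat) (ps : List Nat) (n : Nat) (h : n < p) : gcc (p :: ps) n = gcc ps n := by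
  rw [gcc]; rw [dif_neg (by omega)]; ring

lemma gcc_extra (extra qs : List Nat) (n : Nat) (h : ∀ p ∈ extra, n < p) :
    gcc (extra ++ qs) n = gcc qs n := by
  induction extra with
  | nil => rfl
  | cons p ps ih =>
    rw [List.cons_append, gcc_small p _ n (h p (by simp)), ih (fun q hq => h q (by simp [hq]))]

-- one-step unfoldings of the fuel loops
lemma markMult_succ (k step start limit : Nat) (f : List Bool) :
    markMult (k + 1) step start limit f =
      if start ≤ limit then markMult k step (start + step) limit (f.set start false) else f := rfl

lemma sieveLoop_succ (k limit p : Nat) (f : List Bool) :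
    sieveLoop (k + 1) limit p f =
      if p * p ≤ limit then
        sieveLoop k limit (p + 1)
          (if f.getD p false then markMult (limit + 1) p (p * p) limit f else f)
      else f := rfl

lemma dpGo_succ (k p N s : Nat) (w : List Int) :
    dpGo (k + 1) p N s w =
      if s ≤ N then dpGo k p N (s + 1) (w.set s (w.getD s 0 + w.getD (s - p) 0)) else w := rfl

lemma scanLoop_succ (k : Nat) (target : Int) (w : List Int) (i L : Nat) :
    scanLoop (k + 1) target w i L =
      (if i ≤ L then
        (if w.getD i 0 > target then some (i : Int) else scanLoop k target w (i + 1) L)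
       else none) := rfl

lemma dpGo_length (p N : Nat) : ∀ k s w, (dpGo k p N s w).length = w.length := by
  intro k
  induction k with
  | zero => intro s w; rfl
  | succ k ih =>
    intro s w
    rw [dpGo_succ]
    split
    · rw [ih]; exact List.length_set ..
    · rfl

lemma dpGo_spec (p N : Nat) (qs : List Nat) (hp : 0 < p) :
    ∀ k s w, N + 1 - s ≤ k → p ≤ s → w.length = N + 1 →
      (∀ j, j ≤ N → w.getD j 0 = if j < s then gcc (p :: qs) j else gcc qs j) →
      ∀ j, j ≤ N → (dpGo k p N s w).getD j 0 = gcc (p :: qs) j := by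
  intro k
  induction k with
  | zero =>
    intro s w hk hps hlen hw j hj
    have := hw j hj
    rw [if_pos (by omega)] at this
    exact this
  | succ k ih =>
    intro s w hk hps hlen hw j hj
    by_cases hsN : s ≤ N
    · rw [dpGo_succ, if_pos hsN]
      apply ih (s + 1) _ (by omega) (by omega) (by rw [List.length_set]; exact hlen) _ j hj
      intro j' hj'
      rw [pvGetD_set]
      by_cases hjs : j' = s
      · subst hjs
        rw [if_pos ⟨rfl, by omega⟩, if_pos (by omega)]
        have h1 := hw j' hj'
        rw [if_neg (by omega)] at h1
        have h2 := hw (j' - p) (by omega)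
        rw [if_pos (by omega)] at h2
        rw [h1, h2]
        conv_rhs => rw [gcc]
        rw [dif_pos ⟨hp, hps⟩]
      · rw [if_neg (by simp [hjs])]
        have h1 := hw j' hj'
        by_cases hlt : j' < s
        · rw [if_pos hlt] at h1; rw [if_pos (by omega)]; exact h1
        · rw [if_neg hlt] at h1; rw [if_neg (by omega)]; exact h1
    · rw [dpGo_succ, if_neg hsN]
      have := hw j hj
      rw [if_pos (by omega)] at this
      exact this

lemma dpInner_spec (p N : Nat) (qs : List Nat) (hp : 0 < p) (w : List Int)
    (hlen : w.length = N + 1) (hw : ∀ j, j ≤ N → w.getD j 0 = gcc qs j) :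
    ∀ j, j ≤ N → (dpInner p N w).getD j 0 = gcc (p :: qs) j := by
  apply dpGo_spec p N qs hp (N + 1) p w (by omega) (le_refl p) hlen
  intro j hj
  by_cases h : j < p
  · rw [if_pos h, gcc_small p qs j h]; exact hw j hj
  · rw [if_neg h]; exact hw j hj

lemma dpFold_spec (N : Nat) : ∀ (ps : List Int) (qs : List Nat) (w : List Int),
    (∀ q ∈ ps, (0:Int) < q) → w.length = N + 1 → (∀ j, j ≤ N → w.getD j 0 = gcc qs j) →
    ∀ j, j ≤ N → (ps.foldl (fun w p => dpInner p.toNat N w) w).getD j 0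
      = gcc ((ps.map Int.toNat).reverse ++ qs) j := by
  intro ps
  induction ps with
  | nil => intro qs w _ _ hw j hj; simpa using hw j hj
  | cons p ps ih =>
    intro qs w hpos hlen hw j hj
    have hp : (0:Int) < p := hpos p (by simp)
    have h1 : ∀ j', j' ≤ N → (dpInner p.toNat N w).getD j' 0 = gcc (p.toNat :: qs) j' := by
      intro j' hj'
      exact dpInner_spec p.toNat N qs (by omega) w hlen hw j' hj'
    have hlen2 : (dpInner p.toNat N w).length = N + 1 := by
      unfold dpInner; rw [dpGo_length]; exact hlen
    have := ih (p.toNat :: qs) (dpInner p.toNat N w) (fun q hq => hpos q (by simp [hq])) hlen2 h1 j hj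
    simpa [List.append_assoc] using this

lemma cps_eq_fold (n : Int) : ∀ (primes : List Int) (w : List Int),
    (∀ p ∈ primes, p ≤ n) →
    cpsLoop n primes w = primes.foldl (fun w' p => dpInner p.toNat n.toNat w') w := by
  intro primes
  induction primes with
  | nil => intro w _; rfl
  | cons p ps ih =>
    intro w hle
    rw [cpsLoop, if_neg (by exact not_lt.mpr (hle p (by simp)))]
    simpa using ih _ (fun q hq => hle q (by simp [hq]))

-- the sieve marks nothing below the current start / below p*p
lemma markMult_length (step limit : Nat) : ∀ k start (f : List Bool),
    (markMult k step start limit f).length = f.length := by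
  intro k
  induction k with
  | zero => intro start f; rfl
  | succ k ih =>
    intro start f
    rw [markMult_succ]
    split
    · rw [ih]; exact List.length_set ..
    · rfl

lemma markMult_lt (step limit : Nat) : ∀ k start f i, i < start →
    (markMult k step start limit f).getD i false = f.getD i false := by
  intro k
  induction k with
  | zero => intro start f i hi; rfl
  | succ k ih =>
    intro start f i hi
    by_cases h : start ≤ limit
    · rw [markMult_succ, if_pos h, ih (start + step) _ i (by omega), pvGetD_set,
        if_neg (by simp; omega)]
    · rw [markMult_succ, if_neg h]

lemma sieveLoop_lt (limit : Nat) : ∀ k p f i, i < p * p →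
    (sieveLoop k limit p f).getD i false = f.getD i false := by
  intro k
  induction k with
  | zero => intro p f i hi; rfl
  | succ k ih =>
    intro p f i hi
    by_cases h : p * p ≤ limit
    · have hlt : i < (p + 1) * (p + 1) := by nlinarith
      rw [sieveLoop_succ, if_pos h, ih (p + 1) _ i hlt]
      split
      · exact markMult_lt p limit (limit + 1) (p * p) f i hi
      · rfl
    · rw [sieveLoop_succ, if_neg h]

-- marking up to limit L and up to n' ≤ L agree below n'
lemma markAgree (n' L step : Nat) (hL : n' ≤ L) (hstep : 0 < step) :
    ∀ k1, ∀ k2 start (f g : List Bool), L + 1 - start ≤ k1 → n' + 1 - start ≤ k2 →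
    f.length = L + 1 → g.length = n' + 1 →
    (∀ i, i ≤ n' → f.getD i false = g.getD i false) → ∀ i, i ≤ n' →
    (markMult k1 step start L f).getD i false = (markMult k2 step start n' g).getD i false := by
  intro k1
  induction k1 with
  | zero =>
    intro k2 start f g hk1 hk2 hfl hgl hfg i hi
    have hstart : L < start := by omega
    match k2 with
    | 0 => exact hfg i hi
    | k2 + 1 =>
      rw [markMult_succ, if_neg (by omega)]
      exact hfg i hi
  | succ k1 ih =>
    intro k2 start f g hk1 hk2 hfl hgl hfg i hi
    by_cases h2 : start ≤ n'
    · match k2 with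
      | 0 => exact absurd hk2 (by omega)
      | k2 + 1 =>
        rw [markMult_succ, if_pos (by omega)]
        conv_rhs => rw [markMult_succ, if_pos h2]
        apply ih k2 (start + step) _ _ (by omega) (by omega)
          (by rw [List.length_set]; exact hfl) (by rw [List.length_set]; exact hgl) _ i hi
        intro i' hi'
        rw [pvGetD_set, pvGetD_set]
        by_cases his : i' = start
        · rw [if_pos ⟨his, by omega⟩, if_pos ⟨his, by omega⟩]
        · rw [if_neg (by simp [his]), if_neg (by simp [his])]
          exact hfg i' hi'
    · by_cases h1 : start ≤ L
      · rw [markMult_succ, if_pos h1, markMult_lt step L k1 (start + step) _ i (by omega),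
          pvGetD_set, if_neg (by simp; omega)]
        match k2 with
        | 0 => exact hfg i hi
        | k2 + 1 =>
          rw [markMult_succ, if_neg h2]
          exact hfg i hi
      · rw [markMult_succ, if_neg h1]
        match k2 with
        | 0 => exact hfg i hi
        | k2 + 1 =>
          rw [markMult_succ, if_neg (by omega)]
          exact hfg i hi

lemma sieveAgree (n' L : Nat) (hL : n' ≤ L) : ∀ k1, ∀ k2 p (f g : List Bool), 1 ≤ p →
    L + 1 - p ≤ k1 → n' + 1 - p ≤ k2 → f.length = L + 1 → g.length = n' + 1 →
    (∀ i, i ≤ n' → f.getD i false = g.getD i false) → ∀ i, i ≤ n' →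
    (sieveLoop k1 L p f).getD i false = (sieveLoop k2 n' p g).getD i false := by
  intro k1
  induction k1 with
  | zero =>
    intro k2 p f g hp1 hk1 hk2 hfl hgl hfg i hi
    have hpp : p ≤ p * p := Nat.le_mul_of_pos_left p (by omega)
    match k2 with
    | 0 => exact hfg i hi
    | k2 + 1 =>
      rw [sieveLoop_succ, if_neg (by omega)]
      exact hfg i hi
  | succ k1 ih =>
    intro k2 p f g hp1 hk1 hk2 hfl hgl hfg i hi
    have hpp : p ≤ p * p := Nat.le_mul_of_pos_left p (by omega)
    by_cases h : p * p ≤ n'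
    · have hpn : p ≤ n' := by omega
      match k2 with
      | 0 => exact absurd hk2 (by omega)
      | k2 + 1 =>
        rw [sieveLoop_succ, if_pos (le_trans h hL)]
        conv_rhs => rw [sieveLoop_succ, if_pos h]
        have hfp : f.getD p false = g.getD p false := hfg p hpn
        rw [hfp]
        by_cases hgp : g.getD p false = true
        · rw [if_pos hgp, if_pos hgp]
          apply ih k2 (p + 1) _ _ (by omega) (by omega) (by omega)
            (by rw [markMult_length]; exact hfl) (by rw [markMult_length]; exact hgl) _ i hi
          exact fun i' hi' => markAgree n' L p hL (by omega) (L + 1) (n' + 1) (p * p) f g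
            (by omega) (by omega) hfl hgl hfg i' hi'
        · simp only [Bool.not_eq_true] at hgp
          rw [hgp, if_neg (by simp)]
          exact ih k2 (p + 1) f g (by omega) (by omega) (by omega) hfl hgl hfg i hi
    · have hrhs : (sieveLoop k2 n' p g).getD i false = g.getD i false := by
        match k2 with
        | 0 => rfl
        | k2 + 1 => rw [sieveLoop_succ, if_neg h]
      rw [hrhs, sieveLoop_lt L (k1 + 1) p f i (by omega)]
      exact hfg i hi

lemma sieve_primes_eq (limit : Int) (h : ¬ limit < 2) :
    sieve_primes limit = (PySem.List.pyRange 2 (limit + 1) 1).filter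
      (fun i => (sieveLoop (limit.toNat + 1) limit.toNat 2
        (((List.replicate (limit.toNat + 1) true).set 0 false).set 1 false)).getD i.toNat false) := by
  rw [sieve_primes, if_neg h]

lemma primesUpto_eq (L : Nat) (hL : 2 ≤ L) : primesUpto L = sieve_primes (L : Int) := by
  rw [sieve_primes_eq _ (by omega)]
  unfold primesUpto
  have hcast : ((L : Int)).toNat = L := by omega
  rw [hcast]

lemma sieve_mem (m : Nat) (p : Int) (hp : p ∈ sieve_primes (m : Int)) : 2 ≤ p ∧ p ≤ (m : Int) := by
  unfold sieve_primes at hp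
  split at hp
  · simp at hp
  · have := List.mem_of_mem_filter hp
    rw [PySem.List.mem_pyRange_one] at this
    omega

lemma sieve_split (nn L : Nat) (h2 : 2 ≤ nn) (hnL : nn ≤ L) :
    ∃ rest, sieve_primes (L : Int) = sieve_primes (nn : Int) ++ rest ∧
      ∀ p ∈ rest, (nn : Int) < p := by
  rw [sieve_primes_eq _ (by omega), sieve_primes_eq _ (by omega)]
  rw [PySem.List.pyRange_one_append 2 ((nn : Int) + 1) ((L : Int) + 1) (by omega) (by omega)]
  rw [List.filter_append]
  refine ⟨List.filter
    (fun i => (sieveLoop (((L : Int)).toNat + 1) ((L : Int)).toNat 2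
      (((List.replicate (((L : Int)).toNat + 1) true).set 0 false).set 1 false)).getD i.toNat false)
    (PySem.List.pyRange ((nn : Int) + 1) ((L : Int) + 1) 1), ?_, ?_⟩
  case refine_2 =>
    intro p hp
    have := List.mem_of_mem_filter hp
    rw [PySem.List.mem_pyRange_one] at this
    omega
  case refine_1 =>
    congr 1
    apply List.filter_congr
    intro i hi
    rw [PySem.List.mem_pyRange_one] at hi
    have hcast : ((L : Int)).toNat = L := by omega
    have hcast2 : ((nn : Int)).toNat = nn := by omega
    simp only [hcast, hcast2]
    apply sieveAgree nn L hnL (L + 1) (nn + 1) 2 _ _ (by omega) (by omega) (by omega)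
      (by rw [List.length_set, List.length_set, List.length_replicate])
      (by rw [List.length_set, List.length_set, List.length_replicate]) _ i.toNat (by omega)
    intro i' hi'
    rw [init_getD, init_getD]
    by_cases h2i : 2 ≤ i'
    · rw [if_pos ⟨h2i, by omega⟩, if_pos ⟨h2i, by omega⟩]
    · rw [if_neg (by omega), if_neg (by omega)]

-- A's count of n, as a closed abbreviation
def cntA (n : Int) : Int := count_prime_summations n (sieve_primes n)

lemma cntA_eq_g (n : Nat) (h2 : 2 ≤ n) :
    cntA (n : Int) = gcc (((sieve_primes (n : Int)).map Int.toNat).reverse) n := by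
  have hmem : ∀ p ∈ sieve_primes ((n : Int)), p ≤ (n : Int) := fun p hp => (sieve_mem n p hp).2
  have hpos : ∀ q ∈ sieve_primes ((n : Int)), (0:Int) < q := by
    intro q hq; have := (sieve_mem n q hq).1; omega
  have hN : ((n : Int)).toNat = n := by omega
  unfold cntA count_prime_summations
  rw [cps_eq_fold _ _ _ hmem]
  have := dpFold_spec ((n : Int)).toNat (sieve_primes (n : Int)) []
    ((List.replicate (((n : Int)).toNat + 1) 0).set 0 1) hpos
    (by rw [List.length_set, List.length_replicate])
    (fun j hj => (waysInit_getD (((n : Int)).toNat + 1) j (by omega)).trans (gcc_nil j).symm)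
    ((n : Int)).toNat (le_refl _)
  rw [List.append_nil] at this
  rw [this, hN]

lemma waysB_eq (L n : Nat) (h2 : 2 ≤ n) (hnL : n ≤ L) :
    (dpAll (sieve_primes (L : Int)) L ((List.replicate (L + 1) 0).set 0 1)).getD n 0
      = cntA (n : Int) := by
  have hpos : ∀ q ∈ sieve_primes ((L : Int)), (0:Int) < q := by
    intro q hq; have := (sieve_mem L q hq).1; omega
  obtain ⟨rest, hsplit, hbig⟩ := sieve_split n L h2 hnL
  unfold dpAll
  have := dpFold_spec L (sieve_primes (L : Int)) []
    ((List.replicate (L + 1) 0).set 0 1) hpos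
    (by rw [List.length_set, List.length_replicate])
    (fun j hj => (waysInit_getD (L + 1) j (by omega)).trans (gcc_nil j).symm) n hnL
  rw [List.append_nil] at this
  rw [this, hsplit, List.map_append, List.reverse_append]
  rw [gcc_extra _ _ n ?hrest]
  · exact (cntA_eq_g n h2).symm
  case hrest =>
    intro q hq
    rw [List.mem_reverse, List.mem_map] at hq
    obtain ⟨p, hp, rfl⟩ := hq
    have := hbig p hp
    omega

lemma scan_cases (target : Int) (w : List Int) (L : Nat) : ∀ k i, L + 1 - i ≤ k →
    (scanLoop k target w i L = none ∧ ∀ m, i ≤ m → m ≤ L → ¬ w.getD m 0 > target) ∨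
    (∃ j : Nat, scanLoop k target w i L = some (j : Int) ∧ i ≤ j ∧ j ≤ L ∧ w.getD j 0 > target ∧
      ∀ m, i ≤ m → m < j → ¬ w.getD m 0 > target) := by
  intro k
  induction k with
  | zero =>
    intro i hk
    left
    exact ⟨rfl, fun m h1 h2 => by omega⟩
  | succ k ih =>
    intro i hk
    by_cases hiL : i ≤ L
    · by_cases hwi : w.getD i 0 > target
      · right
        exact ⟨i, by rw [scanLoop_succ, if_pos hiL, if_pos hwi], le_refl i, hiL, hwi,
          fun m h1 h2 => by omega⟩
      · rcases ih (i + 1) (by omega) with ⟨hnone, hall⟩ | ⟨j, hsome, hij, hjL, hwj, hmin⟩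
        · left
          refine ⟨by rw [scanLoop_succ, if_pos hiL, if_neg hwi]; exact hnone, ?_⟩
          intro m h1 h2
          rcases Nat.eq_or_lt_of_le h1 with rfl | h1'
          · exact hwi
          · exact hall m h1' h2
        · right
          refine ⟨j, by rw [scanLoop_succ, if_pos hiL, if_neg hwi]; exact hsome, by omega,
            hjL, hwj, ?_⟩
          intro m h1 h2
          rcases Nat.eq_or_lt_of_le h1 with rfl | h1'
          · exact hwi
          · exact hmin m h1' h2
    · left
      rw [scanLoop_succ, if_neg hiL]
      exact ⟨rfl, fun m h1 h2 => by omega⟩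

lemma fvoLoop_cnt (target n : Int) (fuel : Nat) :
    fvoLoop target n (fuel + 1) = if cntA n > target then n else fvoLoop target (n + 1) fuel := by
  rfl

lemma fvo_hit (target : Int) : ∀ (fuel : Nat) (n j : Int), n ≤ j → cntA j > target →
    (∀ m, n ≤ m → m < j → ¬ cntA m > target) → j - n < (fuel : Int) →
    fvoLoop target n fuel = j := by
  intro fuel
  induction fuel with
  | zero => intro n j h1 h2 h3 h4; simp at h4; omega
  | succ fuel ih =>
    intro n j h1 h2 h3 h4
    rw [fvoLoop_cnt]
    by_cases hc : cntA n > target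
    · have : n = j := by
        by_contra hne
        exact h3 n (le_refl n) (by omega) hc
      rw [if_pos hc, this]
    · rw [if_neg hc]
      have hnj : n < j := by
        rcases eq_or_lt_of_le h1 with rfl | h
        · exact absurd h2 hc
        · exact h
      exact ih (n + 1) j (by omega) h2 (fun m hm1 hm2 => h3 m (by omega) hm2) (by omega)

lemma fvo_shift (target : Int) : ∀ (f1 : Nat) (n : Int) (f2 : Nat),
    (∀ m, n ≤ m → m < n + (f1 : Int) → ¬ cntA m > target) →
    fvoLoop target n (f1 + f2) = fvoLoop target (n + (f1 : Int)) f2 := by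
  intro f1
  induction f1 with
  | zero => intro n f2 _; simp
  | succ f1 ih =>
    intro n f2 h
    rw [show f1 + 1 + f2 = (f1 + f2) + 1 by omega, fvoLoop_cnt,
      if_neg (h n (le_refl n) (by push_cast; omega))]
    rw [ih (n + 1) f2 (fun m hm1 hm2 => h m (by omega) (by push_cast at hm2 ⊢; omega))]
    congr 1
    push_cast
    ring

lemma fvo_none (target : Int) : ∀ (fuel : Nat) (n : Int),
    (∀ m, n ≤ m → m < n + (fuel : Int) → ¬ cntA m > target) →
    fvoLoop target n fuel = 0 := by
  intro fuel
  induction fuel with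
  | zero => intro n _; rfl
  | succ fuel ih =>
    intro n h
    rw [fvoLoop_cnt, if_neg (h n (le_refl n) (by push_cast; omega))]
    exact ih (n + 1) (fun m hm1 hm2 => h m (by omega) (by push_cast at hm2 ⊢; omega))

lemma fvoAlt_succ (target : Int) (L f : Nat) :
    fvoAltLoop target L (f + 1) =
      match scanLoop (L + 1) target
          (dpAll (primesUpto L) L ((List.replicate (L + 1) 0).set 0 1)) 2 L with
      | some j => j
      | none => fvoAltLoop target (L * 2) f := rfl

lemma main_loop (target : Int) : ∀ (fB L nn : Nat), 2 ≤ L → 2 ≤ nn → nn ≤ L + 1 →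
    (∀ m : Nat, 2 ≤ m → m < nn → ¬ cntA (m : Int) > target) →
    fvoLoop target (nn : Int) (L * 2 ^ fB + 1 - nn) = fvoAltLoop target L (fB + 1) := by
  intro fB
  induction fB with
  | zero =>
    intro L nn hL h2 hnn hbelow
    have hw : ∀ m : Nat, 2 ≤ m → m ≤ L →
        (dpAll (primesUpto L) L ((List.replicate (L + 1) 0).set 0 1)).getD m 0
          = cntA (m : Int) := by
      intro m hm2 hmL
      rw [primesUpto_eq L hL]
      exact waysB_eq L m hm2 hmL
    rw [fvoAlt_succ]
    rcases scan_cases target _ L (L + 1) 2 (by omega) with ⟨hnone, hall⟩ |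
      ⟨j, hsome, hij, hjL, hwj, hmin⟩
    · rw [hnone]
      show fvoLoop target (nn : Int) (L * 2 ^ 0 + 1 - nn) = 0
      apply fvo_none
      intro m hm1 hm2
      have hm2' : m ≤ (L : Int) := by simp at hm2; omega
      have hmn : m = ((m.toNat : Nat) : Int) := by omega
      rw [hmn]
      rw [← hw m.toNat (by omega) (by omega)]
      exact hall m.toNat (by omega) (by omega)
    · rw [hsome]
      have hcj : cntA ((j : Nat) : Int) > target := by rw [← hw j (by omega) hjL]; exact hwj
      have hnnj : nn ≤ j := by
        by_contra hlt
        exact hbelow j (by omega) (by omega) hcj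
      apply fvo_hit target _ (nn : Int) (j : Int) (by omega) hcj ?_ ?_
      · intro m hm1 hm2
        have hmn : m = ((m.toNat : Nat) : Int) := by omega
        rw [hmn]
        rw [← hw m.toNat (by omega) (by omega)]
        exact hmin m.toNat (by omega) (by omega)
      · have hLf : L ≤ L * 2 ^ 0 := by simp
        omega
  | succ k ih =>
    intro L nn hL h2 hnn hbelow
    have hw : ∀ m : Nat, 2 ≤ m → m ≤ L →
        (dpAll (primesUpto L) L ((List.replicate (L + 1) 0).set 0 1)).getD m 0
          = cntA (m : Int) := by
      intro m hm2 hmL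
      rw [primesUpto_eq L hL]
      exact waysB_eq L m hm2 hmL
    rw [fvoAlt_succ]
    rcases scan_cases target _ L (L + 1) 2 (by omega) with ⟨hnone, hall⟩ |
      ⟨j, hsome, hij, hjL, hwj, hmin⟩
    · rw [hnone]
      have hnohit : ∀ m : Int, 2 ≤ m → m ≤ (L : Int) → ¬ cntA m > target := by
        intro m hm1 hm2
        have hmn : m = ((m.toNat : Nat) : Int) := by omega
        rw [hmn]
        rw [← hw m.toNat (by omega) (by omega)]
        exact hall m.toNat (by omega) (by omega)
      have hpow : L * 2 ^ (k + 1) = (L * 2) * 2 ^ k := by rw [pow_succ]; ring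
      have hLf : L ≤ L * 2 ^ (k + 1) := Nat.le_mul_of_pos_right L (Nat.two_pow_pos _)
      have hfuel : L * 2 ^ (k + 1) + 1 - nn = (L + 1 - nn) + ((L * 2) * 2 ^ k + 1 - (L + 1)) := by
        omega
      rw [hfuel, fvo_shift target (L + 1 - nn) (nn : Int) _ ?hseg]
      case hseg =>
        intro m hm1 hm2
        apply hnohit m (by omega)
        omega
      have harg : (nn : Int) + ((L + 1 - nn : Nat) : Int) = (((L + 1 : Nat)) : Int) := by omega
      rw [harg]
      apply ih (L * 2) (L + 1) (by omega) (by omega) (by omega)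
      intro m hm1 hm2
      exact hnohit (m : Int) (by omega) (by omega)
    · rw [hsome]
      have hcj : cntA ((j : Nat) : Int) > target := by rw [← hw j (by omega) hjL]; exact hwj
      have hnnj : nn ≤ j := by
        by_contra hlt
        exact hbelow j (by omega) (by omega) hcj
      apply fvo_hit target _ (nn : Int) (j : Int) (by omega) hcj ?_ ?_
      · intro m hm1 hm2
        have hmn : m = ((m.toNat : Nat) : Int) := by omega
        rw [hmn]
        rw [← hw m.toNat (by omega) (by omega)]
        exact hmin m.toNat (by omega) (by omega)
      · have hLf : L ≤ L * 2 ^ (k + 1) := Nat.le_mul_of_pos_right L (Nat.two_pow_pos _)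
        omega

-- ===== VERDICT (by name: the statement is the Claim_ definition above) =====
theorem first_value_over_spec : Claim_equal_first_value_over := by
  intro target _
  unfold Spec_first_value_over first_value_over first_value_over_alt
  have h := main_loop target 7 4 2 (by norm_num) (by norm_num) (by norm_num)
    (by intro m h2 hm; omega)
  norm_num at h
  exact_mod_cast h
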